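-- pv_equiv track=rewrite | github.com/JJ-IoT-2019-Summer/Algorithm | 프로그래머스/lv2/64065. 튜플/튜플.py | solution
-- ===== SOURCE A (Python) =====
-- from collections import defaultdict
--
-- def solution(s):
--     answer = []
--     dict = defaultdict(int)
--     s = map(int,(s.replace("{","").replace("}","")).split(","))
--     for num in s:
--         dict[num] += 1
--
--     sorted_dict = sorted(dict.items(), key = lambda x : x[1], reverse=True)
--     for a,_ in sorted_dict:
--         answer.append(a)
--
--     return answer
-- ===== SOURCE B (Python) =====
-- from collections import defaultdict
--
-- def solution(s):
--     counts = defaultdict(int)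
--     for num in map(int, (s.replace("{", "").replace("}", "")).split(",")):
--         counts[num] += 1
--
--     # bucket by frequency instead of sorting: groups[c] keeps first-appearance order
--     groups = defaultdict(list)
--     maxc = 0
--     for num, c in counts.items():
--         groups[c].append(num)
--         if maxc < c:
--             maxc = c
--
--     answer = []
--     for c in range(maxc, 0, -1):
--         answer += groups[c]
--     return answer
-- ===== Notes on version B (the rewrite author's own statement) =====
-- stated objective: alternative
-- what changed: Replaces the comparison sort of (number, count) items by a frequency-bucket pass: numbers are grouped into a dict keyed by their count while tracking the maximum count, and the answer is built by walking the bucket keys from the highest count down to 1, preserving first-appearance order within each bucket.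
import Mathlib
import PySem

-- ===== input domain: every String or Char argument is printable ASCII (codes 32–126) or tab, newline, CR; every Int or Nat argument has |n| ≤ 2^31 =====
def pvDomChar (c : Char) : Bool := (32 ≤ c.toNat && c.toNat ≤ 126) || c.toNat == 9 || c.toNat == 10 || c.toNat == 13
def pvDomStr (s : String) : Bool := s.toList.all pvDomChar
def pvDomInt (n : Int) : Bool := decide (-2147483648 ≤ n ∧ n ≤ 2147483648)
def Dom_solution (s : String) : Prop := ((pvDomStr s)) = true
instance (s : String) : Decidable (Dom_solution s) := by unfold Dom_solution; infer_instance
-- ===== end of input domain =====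

-- B replaces A's comparison sort by frequency buckets walked from the highest count down; return value proved equal.

-- ===== PORT A =====
-- shared parse: map(int, s.replace("{","").replace("}","").split(",")); int() raises
-- on a non-integer piece — Pre_solution excludes exactly those strings (filterMap skips them).
def pvNums (s : String) : List Int :=
  ((PySem.Str.split? (PySem.Str.replace (PySem.Str.replace s "{" "") "}" "") ",").getD []).filterMap
    PySem.Int.ofStr?

def solution (s : String) : List Int :=
  let d : PySem.Dict Int Int :=
    (pvNums s).foldl (fun d num => d.modify num 0 (· + 1)) PySem.Dict.empty
  let sorted_dict := PySem.List.sorted d.items (fun x => x.2) true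
  sorted_dict.foldl (fun answer p => answer ++ [p.1]) []

-- ===== PORT B =====
def solution_alt (s : String) : List Int :=
  let counts : PySem.Dict Int Int :=
    (pvNums s).foldl (fun d num => d.modify num 0 (· + 1)) PySem.Dict.empty
  let st : PySem.Dict Int (List Int) × Int :=
    counts.items.foldl
      (fun st p => (st.1.modify p.2 [] (· ++ [p.1]), if st.2 < p.2 then p.2 else st.2))
      (PySem.Dict.empty, 0)
  (PySem.List.pyRange st.2 0 (-1)).foldl (fun answer c => answer ++ st.1.getD c []) []

-- ===== PRECONDITION & SPEC =====
-- Pre_: every comma-separated piece parses as an int (otherwise Python's int() raises ValueError).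
def Pre_solution (s : String) : Prop :=
  ∀ p ∈ (PySem.Str.split? (PySem.Str.replace (PySem.Str.replace s "{" "") "}" "") ",").getD [],
    (PySem.Int.ofStr? p).isSome = true
instance (s : String) : Decidable (Pre_solution s) := by unfold Pre_solution; infer_instance

def pvWitness_solution : String := "{2,1,2}"

def Spec_solution (s : String) (out : List Int) : Prop := out = solution_alt s
instance (s : String) (out : List Int) : Decidable (Spec_solution s out) := by unfold Spec_solution; infer_instance

-- ===== CLAIM (what is proved, stated in full; the proofs are below) =====
def Claim_equal_solution : Prop := ∀ (s : String), Dom_solution s → Pre_solution s → Spec_solution s (solution s)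

-- ===== LEMMAS AND PROOFS =====

theorem insertBy_skip {α : Type} (before : α → α → Bool) (x : α) (P S : List α)
    (h : ∀ y ∈ P, before x y = false) :
    PySem.List.insertBy before x (P ++ S) = P ++ PySem.List.insertBy before x S := by
  induction P with
  | nil => rfl
  | cons p P ih =>
      have hp : before x p = false := h p (List.mem_cons_self ..)
      cases S with
      | nil => simpa [PySem.List.insertBy, hp] using ih (fun y hy => h y (List.mem_cons_of_mem _ hy))
      | cons s S => simpa [PySem.List.insertBy, hp] using ih (fun y hy => h y (List.mem_cons_of_mem _ hy))

theorem insertBy_front {α : Type} (before : α → α → Bool) (x : α) (R : List α)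
    (h : ∀ y ∈ R, before x y = true) :
    PySem.List.insertBy before x R = x :: R := by
  cases R with
  | nil => rfl
  | cons r R => simp [PySem.List.insertBy, h r (List.mem_cons_self ..)]

theorem insert_buckets (x : Int × Int) (G : Int → List (Int × Int)) (n : Int)
    (hG : ∀ c p, p ∈ G c → p.2 = c) (hc1 : 1 ≤ x.2) (hcn : x.2 ≤ n) :
    PySem.List.insertBy (fun a b => decide (b.2 < a.2)) x
        ((PySem.List.pyRange n 0 (-1)).flatMap G)
      = (PySem.List.pyRange n 0 (-1)).flatMap
          (fun c => G c ++ if x.2 == c then [x] else []) := by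
  obtain ⟨m, hm⟩ : ∃ m : ℕ, n = x.2 + m := ⟨(n - x.2).toNat, by omega⟩
  subst hm
  induction m with
  | zero =>
      simp only [Nat.cast_zero, add_zero]
      rw [PySem.List.pyRange_neg_one_cons (by omega)]
      simp only [List.flatMap_cons]
      rw [insertBy_skip _ _ _ _ (fun y hy => by
        have := hG x.2 y hy; simp [this])]
      rw [insertBy_front _ _ _ (fun y hy => by
        obtain ⟨c, hc, hyc⟩ := List.mem_flatMap.mp hy
        have h1 := (PySem.List.mem_pyRange_neg_one).mp hc
        have h2 := hG c y hyc
        simp only [decide_eq_true_eq]; omega)]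
      have hrest : ((PySem.List.pyRange (x.2 - 1) 0 (-1)).flatMap
            (fun c => G c ++ if x.2 == c then [x] else []))
          = (PySem.List.pyRange (x.2 - 1) 0 (-1)).flatMap G := by
        apply List.flatMap_congr
        intro c hc
        have h1 := (PySem.List.mem_pyRange_neg_one).mp hc
        have : (x.2 == c) = false := by simp; omega
        simp [this]
      rw [hrest]
      simp
  | succ m ih =>
      rw [PySem.List.pyRange_neg_one_cons (by push_cast; omega)]
      simp only [List.flatMap_cons]
      rw [insertBy_skip _ _ _ _ (fun y hy => by
        have := hG (x.2 + (↑m + 1)) y hy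
        simp only [decide_eq_false_iff_not, not_lt]
        push_cast at this ⊢; omega)]
      have hn : (x.2 + (↑(m + 1) : ℤ)) - 1 = x.2 + ↑m := by push_cast; ring
      rw [hn, ih (by omega)]
      simp
      omega

theorem sorted_rev_buckets (xs : List (Int × Int)) (n : Int)
    (h : ∀ p ∈ xs, 1 ≤ p.2 ∧ p.2 ≤ n) :
    PySem.List.sorted xs (fun p => p.2) true
      = (PySem.List.pyRange n 0 (-1)).flatMap (fun c => xs.filter (fun p => p.2 == c)) := by
  induction xs using List.reverseRecOn with
  | nil => rw [PySem.List.sorted_rev_eq_foldl_insertBy]; simp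
  | append_singleton xs x ih =>
      rw [PySem.List.sorted_rev_eq_foldl_insertBy, List.foldl_append,
        ← PySem.List.sorted_rev_eq_foldl_insertBy]
      simp only [List.foldl_cons, List.foldl_nil]
      rw [ih (fun p hp => h p (List.mem_append_left _ hp))]
      have hx := h x (List.mem_append_right _ (List.mem_cons_self ..))
      rw [insert_buckets x (fun c => xs.filter (fun p => p.2 == c)) n
        (fun c p hp => by simpa using (List.mem_filter.mp hp).2) hx.1 hx.2]
      apply List.flatMap_congr
      intro c _
      simp [List.filter_append, List.filter_cons]

theorem solution_spec : Claim_equal_solution := by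
  intro s _ _
  unfold Spec_solution solution solution_alt
  simp only []
  rw [← PySem.Dict.counter_eq_foldl]
  set items := (PySem.Dict.counter (pvNums s)).items with hitems
  -- count lower bound: every stored count is ≥ 1
  have hone : ∀ p ∈ items, 1 ≤ p.2 := by
    intro p hp
    rw [hitems, PySem.Dict.items_counter] at hp
    obtain ⟨k, hk, rfl⟩ := List.mem_map.mp hp
    have : k ∈ pvNums s := (PySem.Set.mem_ofList _ _).mp hk
    have h2 := List.count_pos_iff.mpr this
    show 1 ≤ ((k, (List.count k (pvNums s) : Int)).2)
    simp only []
    exact_mod_cast h2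
  -- the pair fold of B splits into the groups dict and the running max
  rw [PySem.List.foldl_prod_mk
    (fun (d : PySem.Dict Int (List Int)) (p : Int × Int) => d.modify p.2 [] (· ++ [p.1]))
    (fun (m : Int) (p : Int × Int) => if m < p.2 then p.2 else m) items PySem.Dict.empty 0]
  -- the running "if m < c then c else m" is a running max
  have hmax : (fun (m : Int) (p : Int × Int) => if m < p.2 then p.2 else m)
      = fun m p => max m p.2 := by
    funext m p; rw [max_def]; split_ifs <;> omega
  rw [hmax]
  have hub := (PySem.List.le_foldl_max_int items (fun p => p.2) 0).2
  set M := items.foldl (fun m p => max m p.2) 0 with hM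
  -- the groups dict bucket contents, via the grouping-loop lemma on swapped pairs
  have hgroups : ∀ c : Int,
      (items.foldl (fun d p => d.modify p.2 [] (· ++ [p.1])) PySem.Dict.empty).getD c []
        = (items.filter (fun p => p.2 == c)).map (fun p => p.1) := by
    intro c
    have : items.foldl (fun d p => d.modify p.2 [] (· ++ [p.1])) PySem.Dict.empty
        = (items.map Prod.swap).foldl (fun d q => d.modify q.1 [] (· ++ [q.2]))
            PySem.Dict.empty := by
      rw [List.foldl_map]; rfl
    rw [this, PySem.Dict.getD_foldl_modify_append]
    simp [List.filter_map, Function.comp_def, Prod.swap]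
  -- both final loops, as map/flatMap
  rw [PySem.List.foldl_append_singleton_eq_map]
  have hB : (fun (answer : List Int) (c : Int) =>
        answer ++ (items.foldl (fun d p => d.modify p.2 [] (· ++ [p.1]))
          PySem.Dict.empty).getD c [])
      = fun answer c => answer ++ (items.filter (fun p => p.2 == c)).map (fun p => p.1) := by
    funext answer c; rw [hgroups c]
  rw [hB, PySem.List.foldl_append_eq_flatMap]
  rw [sorted_rev_buckets items M (fun p hp => ⟨hone p hp, hub p hp⟩)]
  simp [List.map_flatMap]
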